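/-
  STEP 3 OF `inverse_mdct`: THE FIVE HELPERS AND THE LOOP NEST THAT CALLS THEM (design/I5.md §2.3, §4.3), IN CLOSED FORM.
  The documentation of the whole MDCT vocabulary is the header of Vorbis/Mdct.lean; read that first.

  TWO KINDS OF LEMMA.
  (1) INSIDE A HELPER (namespaces `Iter0 RLoop SLoop Ld654 Iter54`): the helper's precondition says that certain intervals of
      floats below a pointer are live; the lemma says that the access of iteration `t`, sub-offset `j`, lies in that interval.
      Generic in the iteration count `m`; nothing about `n`.
  (2) AT A CALL SITE IN `inverse_mdct` (namespace `Call`): the arguments as numbers, the iteration count, and the fact that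
      the intervals the helper will touch lie inside `u[0 .. n2)` and `A[0 .. n2)`. Stated over `Ld n k` (the block size WITH
      its `ld`), because the loop bounds of the nest are functions of `ld`; proved by the case split on the 8 sizes (and the ≤ 3
      values of `l`) that I5 recommends. Which loops run for which size: `first_runs`, `second_runs`, `r1_count`.

  The index-level shape of the two kinds of precondition is a small structure (`PairDown`: iter0 / r_loop; `StrideDown`: s_loop),
  produced by (2) and consumed by (1); `PairDown.inLive0` … turn it into `InLive` of the byte interval, given the live block of `u`.

  All quantities are natural numbers: the C `int`s of this code are non-negative except the `k_off` arguments, which appear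
  here as the number subtracted (`koff = n8`, `n16`, `k0_2`). Every product and shift stays below `2 ^ 14`, so no 32-bit
  arithmetic of the nest (`imul edi, r13d`, `sar edi, cl`, `shl r9d, cl`, `shl ebp, 4`) overflows or has its count masked
  (fields `counts` of `Call.FirstL` / `Call.SecondL`).  Numeric cross-check against the integer replay: design/tools/check_mdct_lemmas.py.
-/
import Vorbis.Mdct.Size
namespace Vorbis.Mdct
open X86 X86.User Asan

/-! ### 0. The index-level shape of the helpers' preconditions -/

/-- **Two runs of `cnt` floats walking down** (imdct_step3_iter0_loop, imdct_step3_inner_r_loop): `e0` touches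
`e[i0 - cnt + 1 .. i0]`, `e2` touches the same shifted down by `koff` (`e2 = e0 + k_off`, `k_off = -koff`). The structure says
that both runs lie inside `e[0 .. len)`. `cnt = 8 m` for `m` iterations; `cnt = 0` (no iteration) is allowed. -/
structure PairDown (len i0 koff cnt : Nat) : Prop where
  /-- the highest index touched, `e0[0]`, is inside the array -/
  hi : i0 < len
  /-- the lowest index touched, `e2[-(cnt - 1)] = e[i0 - koff - cnt + 1]`, is not negative -/
  lo : koff + cnt ≤ i0 + 1

/-- An access of the upper run: element `e0[-d]`, `d < cnt`. -/
theorem PairDown.e0 {len i0 koff cnt d : Nat} (h : PairDown len i0 koff cnt) (hd : d < cnt) :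
    d ≤ i0 ∧ i0 - d < len := by
  have h1 := h.hi
  have h2 := h.lo
  omega

/-- An access of the lower run: element `e2[-d]`, `d < cnt`. -/
theorem PairDown.e2 {len i0 koff cnt d : Nat} (h : PairDown len i0 koff cnt) (hd : d < cnt) :
    koff + d ≤ i0 ∧ i0 - koff - d < len := by
  have h1 := h.hi
  have h2 := h.lo
  omega

/-- **Groups of 8 floats at stride `k0`, twice** (imdct_step3_inner_s_loop with `cnt` iterations): iteration `s` touches
`e[i0 - k0 s - 7 .. i0 - k0 s]` and the same shifted down by `koff`. The structure says that all groups lie inside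
`e[0 .. len)`. Needs `1 ≤ cnt` to say something (with `cnt = 0` nothing is touched). -/
structure StrideDown (len i0 koff k0 cnt : Nat) : Prop where
  /-- the highest index touched, `ee0[0]`, is inside the array -/
  hi : i0 < len
  /-- the lowest index touched, `ee2[-7]` of the last iteration, is not negative -/
  lo : k0 * (cnt - 1) + koff + 7 ≤ i0

/-- An access of iteration `s < cnt`, offset `j ≤ 7`, of the upper groups. -/
theorem StrideDown.ee0 {len i0 koff k0 cnt s j : Nat} (h : StrideDown len i0 koff k0 cnt) (hs : s < cnt) (hj : j ≤ 7) :
    k0 * s + j ≤ i0 ∧ i0 - k0 * s - j < len := by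
  have h1 := h.hi
  have h2 := h.lo
  have h3 : k0 * s ≤ k0 * (cnt - 1) := Nat.mul_le_mul_left k0 (by omega)
  omega

/-- An access of iteration `s < cnt`, offset `j ≤ 7`, of the lower groups. -/
theorem StrideDown.ee2 {len i0 koff k0 cnt s j : Nat} (h : StrideDown len i0 koff k0 cnt) (hs : s < cnt) (hj : j ≤ 7) :
    k0 * s + koff + j ≤ i0 ∧ i0 - koff - k0 * s - j < len := by
  have h1 := h.hi
  have h2 := h.lo
  have h3 : k0 * s ≤ k0 * (cnt - 1) := Nat.mul_le_mul_left k0 (by omega)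
  omega

/-- The floats `p[lo .. lo + cnt)` of a live block are live bytes: from an index interval to the `InLive` a helper's
precondition is stated with. -/
theorem floats_inLive {Live : Nat → Prop} {p sz lo cnt : Nat} (hB : (Block.mk p sz).live Live) (h : 4 * (lo + cnt) ≤ sz) :
    InLive Live (p + 4 * lo) (4 * cnt) := by
  apply hB.inLive
  simp only [vblock]
  omega

/-- The upper run of a `PairDown` inside a live block of at least `len` floats. -/
theorem PairDown.inLive0 {Live : Nat → Prop} {p sz len i0 koff cnt : Nat} (h : PairDown len i0 koff cnt)
    (hB : (Block.mk p sz).live Live) (hlen : 4 * len ≤ sz) : InLive Live (p + 4 * (i0 + 1 - cnt)) (4 * cnt) := by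
  have h1 := h.hi
  have h2 := h.lo
  exact floats_inLive hB (by omega)

/-- The lower run of a `PairDown` inside a live block of at least `len` floats. -/
theorem PairDown.inLive2 {Live : Nat → Prop} {p sz len i0 koff cnt : Nat} (h : PairDown len i0 koff cnt)
    (hB : (Block.mk p sz).live Live) (hlen : 4 * len ≤ sz) : InLive Live (p + 4 * (i0 + 1 - koff - cnt)) (4 * cnt) := by
  have h1 := h.hi
  have h2 := h.lo
  exact floats_inLive hB (by omega)

/-- One group of a `StrideDown` (upper groups; `koff := 0` in the index gives it, the lower groups are `inLive2`). -/
theorem StrideDown.inLive0 {Live : Nat → Prop} {p sz len i0 koff k0 cnt s : Nat} (h : StrideDown len i0 koff k0 cnt)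
    (hs : s < cnt) (hB : (Block.mk p sz).live Live) (hlen : 4 * len ≤ sz) :
    InLive Live (p + 4 * (i0 - k0 * s - 7)) (4 * 8) := by
  have h0 := h.hi
  have h1 := h.ee0 hs (Nat.le_refl 7)
  exact floats_inLive hB (by omega)

/-- One group of a `StrideDown`, lower groups. -/
theorem StrideDown.inLive2 {Live : Nat → Prop} {p sz len i0 koff k0 cnt s : Nat} (h : StrideDown len i0 koff k0 cnt)
    (hs : s < cnt) (hB : (Block.mk p sz).live Live) (hlen : 4 * len ≤ sz) :
    InLive Live (p + 4 * (i0 - koff - k0 * s - 7)) (4 * 8) := by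
  have h0 := h.hi
  have h1 := h.ee2 hs (Nat.le_refl 7)
  exact floats_inLive hB (by omega)

/-! ### 1. Inside the helpers -/

/-! imdct_step3_iter0_loop: `m = n' >> 2` iterations; iteration `t` reads and writes `ee0[-j]`, `ee2[-j]` at `8 t + j`
floats below the initial pointers (`j ≤ 7`), and reads `A[32 t + a]`, `a ∈ {0, 1, 8, 9, 16, 17, 24, 25}`. -/
namespace Iter0

/-- The `e` accesses stay in the run of `8 m` floats `ee[-8m + 1 .. 0]`. -/
theorem e {m t j : Nat} (ht : t < m) (hj : j ≤ 7) : 8 * t + j < 8 * m := by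
  omega

/-- The `A` accesses stay in `A[0 .. 32 m - 7]`. -/
theorem A {m t a : Nat} (ht : t < m) (ha : a ≤ 25) : 32 * t + a ≤ 32 * m - 7 := by
  omega

end Iter0

/-! imdct_step3_inner_r_loop: `m = lim >> 2` iterations; the `e` accesses as in iter0; `A` advances by `k1` floats after each
of the four quarters, so quarter `j ≤ 3` of iteration `t` reads `A[k1 (4 t + j) + d]`, `d ≤ 1`. -/
namespace RLoop

/-- The `e` accesses stay in the run of `8 m` floats `e[-8m + 1 .. 0]`. -/
theorem e {m t j : Nat} (ht : t < m) (hj : j ≤ 7) : 8 * t + j < 8 * m := by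
  omega

/-- The `A` accesses stay in `A[0 .. k1 (4 m - 1) + 1]`. -/
theorem A {m t j d k1 : Nat} (ht : t < m) (hj : j ≤ 3) (hd : d ≤ 1) : k1 * (4 * t + j) + d ≤ k1 * (4 * m - 1) + 1 := by
  have h : k1 * (4 * t + j) ≤ k1 * (4 * m - 1) := Nat.mul_le_mul_left k1 (by omega)
  omega

end RLoop

/-! imdct_step3_inner_s_loop: 8 twiddle factors `A[a_off j + d]` (`j ≤ 3`, `d ≤ 1`) read BEFORE the loop (also when the count is
not positive); then `m = n'` iterations, iteration `s` touching the groups `ee0[-k0 s - 7 .. -k0 s]`, `ee2[…]`. -/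
namespace SLoop

/-- The prologue's `A` reads stay in `A[0 .. 3 a_off + 1]`; the 32-bit `2 a_off`, `3 a_off` do not overflow for `a_off ≤ 512`. -/
theorem A {aoff j d : Nat} (hj : j ≤ 3) (hd : d ≤ 1) : aoff * j + d ≤ 3 * aoff + 1 := by
  have h : aoff * j ≤ aoff * 3 := Nat.mul_le_mul_left aoff hj
  omega

/-- The `e` accesses of iteration `s < m`, offset `j ≤ 7`: at most `k0 (m - 1) + 7` floats below the initial pointer. -/
theorem e {m s j k0 : Nat} (hs : s < m) (hj : j ≤ 7) : k0 * s + j ≤ k0 * (m - 1) + 7 := by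
  have h : k0 * s ≤ k0 * (m - 1) := Nat.mul_le_mul_left k0 (by omega)
  omega

end SLoop

/-! imdct_step3_inner_s_loop_ld654: `A[base_n >> 3]` read before the loop; `m = n'` iterations of 16 floats
`z[-15 .. 0]`, `z = z0 - 16 t`; `while (z > base)` with `base = z0 - 16 m` is an UNSIGNED pointer comparison. -/
namespace Ld654

/-- The `z` accesses of iteration `t < m`, offset `j ≤ 15`, stay in the run of `16 m` floats `z0[-16m + 1 .. 0]`. -/
theorem z {m t j : Nat} (ht : t < m) (hj : j ≤ 15) : 16 * t + j < 16 * m := by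
  omega

/-- **The unsigned test `z > base`** for the pointer values `pz` of `z` after `t ≤ m` iterations (`pz + 64 t = z0` bytes) and `pb`
of `base` (`pb + 64 m = z0`): true exactly while `t < m`; the loop exits at `z = base` because the distance is a multiple of
the stride. `pb` is a natural number, i.e. `z0 - 64 m` did not wrap (at the call site `base = u - 4` bytes, `u ≥ 800000H`).
Measure `m - t = (pz - pb) / 64`. -/
theorem test {m t pz pb z0 : Nat} (ht : t ≤ m) (hz : pz + 64 * t = z0) (hb : pb + 64 * m = z0) : pb < pz ↔ t < m := by
  omega

/-- The two calls of `iter_54` in iteration `t`: `iter_54(z)` touches offsets `0 .. 7`, `iter_54(z - 8)` offsets `8 .. 15` of the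
16 floats the iteration has already checked. -/
theorem iter54_args {m t j : Nat} (ht : t < m) (hj : j ≤ 7) : 16 * t + j < 16 * m ∧ 16 * t + 8 + j < 16 * m := by
  omega

end Ld654

/-! iter_54(z): reads and writes the 8 floats `z[-7 .. 0]`; no loop. -/
namespace Iter54

/-- The eight accesses `z[-j]`, `j ≤ 7`, stay in the run of 8 floats of the precondition. -/
theorem z {j : Nat} (hj : j ≤ 7) : j < 8 := by
  omega

end Iter54

/-! ### 2. The quantities of the loop nest (lines 2777–2797) -/

/-- `k0 = n >> (l + 2)`. -/
def k0 (n l : Nat) : Nat := n >>> (l + 2)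

/-- `k0_2 = k0 >> 1`. -/
def k02 (n l : Nat) : Nat := k0 n l >>> 1

/-- `lim = 1 << (l + 1)`. -/
def lim (l : Nat) : Nat := 1 <<< (l + 1)

/-- `k1 = 1 << (l + 3)`. -/
def k1 (l : Nat) : Nat := 1 <<< (l + 3)

/-- `rlim = n >> (l + 6)`; also the iteration count `(n >> (l + 4)) >> 2` of the r_loop calls of the first `l` loop. -/
def rlim (n l : Nat) : Nat := n >>> (l + 6)

/-- The value of `l` when the first loop is left and the second entered: `max(2, (ld - 3) >> 1)`. -/
def lmid (k : Nat) : Nat := max 2 ((k - 3) / 2)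

/-- The guard of the first `l` loop (`l` starts at 2): `l < (ld - 3) >> 1`. -/
def InFirst (k l : Nat) : Prop := 2 ≤ l ∧ l < (k - 3) / 2

/-- The guard of the second `l` loop (`l` continues from `lmid`): `l < ld - 6`. -/
def InSecond (k l : Nat) : Prop := lmid k ≤ l ∧ l < k - 6

/-- The machine computes `(ld - 3) >> 1` as `(ilog - 4) >> 1` and `ld - 6` as `ilog - 7`, with `ilog = ld + 1` in the frame. -/
theorem guards_from_ilog (k : Nat) (h6 : 6 ≤ k) : (k + 1 - 4) >>> 1 = (k - 3) / 2 ∧ k + 1 - 7 = k - 6 := by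
  omega

/-- **Which `l` the first loop runs for** (the table of I5 §4.3): none for `ld ≤ 8`; 2 for `ld = 9, 10`; 2, 3 for `ld = 11, 12`;
2, 3, 4 for `ld = 13`. -/
theorem first_runs {k l : Nat} (h6 : 6 ≤ k) (h13 : k ≤ 13) :
    InFirst k l ↔ (k = 9 ∧ l = 2) ∨ (k = 10 ∧ l = 2) ∨ (k = 11 ∧ l = 2) ∨ (k = 11 ∧ l = 3) ∨ (k = 12 ∧ l = 2) ∨
      (k = 12 ∧ l = 3) ∨ (k = 13 ∧ l = 2) ∨ (k = 13 ∧ l = 3) ∨ (k = 13 ∧ l = 4) := by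
  unfold InFirst
  have hk : k = 6 ∨ k = 7 ∨ k = 8 ∨ k = 9 ∨ k = 10 ∨ k = 11 ∨ k = 12 ∨ k = 13 := by omega
  rcases hk with rfl | rfl | rfl | rfl | rfl | rfl | rfl | rfl <;> omega

/-- The value of `l` between the two loops, per size. -/
theorem lmid_table {k : Nat} (h6 : 6 ≤ k) (h13 : k ≤ 13) :
    (k ≤ 8 ∧ lmid k = 2) ∨ (k = 9 ∧ lmid k = 3) ∨ (k = 10 ∧ lmid k = 3) ∨ (k = 11 ∧ lmid k = 4) ∨ (k = 12 ∧ lmid k = 4) ∨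
      (k = 13 ∧ lmid k = 5) := by
  unfold lmid
  omega

/-- **Which `l` the second loop runs for**: none for `ld ≤ 9`; 3 for `ld = 10`; 4 for `ld = 11`; 4, 5 for `ld = 12`; 5, 6 for
`ld = 13`. -/
theorem second_runs {k l : Nat} (h6 : 6 ≤ k) (h13 : k ≤ 13) :
    InSecond k l ↔ (k = 10 ∧ l = 3) ∨ (k = 11 ∧ l = 4) ∨ (k = 12 ∧ l = 4) ∨ (k = 12 ∧ l = 5) ∨ (k = 13 ∧ l = 5) ∨
      (k = 13 ∧ l = 6) := by
  unfold InSecond lmid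
  have hk : k = 6 ∨ k = 7 ∨ k = 8 ∨ k = 9 ∨ k = 10 ∨ k = 11 ∨ k = 12 ∨ k = 13 := by omega
  rcases hk with rfl | rfl | rfl | rfl | rfl | rfl | rfl | rfl <;> omega

/-- **For `n ≤ 256` both `l` loops run zero times**: `l = 2` fails both guards. -/
theorem no_l_loops {k : Nat} (h6 : 6 ≤ k) (h8 : k ≤ 8) : ¬ InFirst k 2 ∧ lmid k = 2 ∧ ¬ InSecond k 2 := by
  unfold InFirst InSecond lmid
  omega

/-- The first loop is left exactly at `lmid`: if its guard fails at `l` and held (or `l = 2`) before, `l = lmid k`. The loop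
invariant `2 ≤ l ≤ lmid k` with the failed guard gives the second loop's start. -/
theorem first_exit {k l : Nat} (hl2 : 2 ≤ l) (hle : l ≤ lmid k) (hg : ¬ l < (k - 3) / 2) : l = lmid k := by
  unfold lmid at *
  omega

/-- The first loop's invariant `l ≤ lmid k` is kept by `++l` under the guard. -/
theorem first_step {k l : Nat} (h : InFirst k l) : l + 1 ≤ lmid k := by
  unfold InFirst at h
  unfold lmid
  omega

/-- The sizes and `l` values of the first loop, size and `l` together (for the case split of the lemmas below). -/
theorem InFirst.cases {n k l : Nat} (h : Ld n k) (hl : InFirst k l) :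
    (n = 512 ∧ l = 2) ∨ (n = 1024 ∧ l = 2) ∨ (n = 2048 ∧ l = 2) ∨ (n = 2048 ∧ l = 3) ∨ (n = 4096 ∧ l = 2) ∨
      (n = 4096 ∧ l = 3) ∨ (n = 8192 ∧ l = 2) ∨ (n = 8192 ∧ l = 3) ∨ (n = 8192 ∧ l = 4) := by
  unfold InFirst at hl
  rcases h.cases with ⟨rfl, rfl⟩ | ⟨rfl, rfl⟩ | ⟨rfl, rfl⟩ | ⟨rfl, rfl⟩ | ⟨rfl, rfl⟩ | ⟨rfl, rfl⟩ | ⟨rfl, rfl⟩ | ⟨rfl, rfl⟩ <;>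
    omega

/-- The sizes and `l` values of the second loop, size and `l` together. -/
theorem InSecond.cases {n k l : Nat} (h : Ld n k) (hl : InSecond k l) :
    (n = 1024 ∧ l = 3) ∨ (n = 2048 ∧ l = 4) ∨ (n = 4096 ∧ l = 4) ∨ (n = 4096 ∧ l = 5) ∨ (n = 8192 ∧ l = 5) ∨
      (n = 8192 ∧ l = 6) := by
  unfold InSecond lmid at hl
  rcases h.cases with ⟨rfl, rfl⟩ | ⟨rfl, rfl⟩ | ⟨rfl, rfl⟩ | ⟨rfl, rfl⟩ | ⟨rfl, rfl⟩ | ⟨rfl, rfl⟩ | ⟨rfl, rfl⟩ | ⟨rfl, rfl⟩ <;>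
    omega

/-! ### 3. The call sites -/
namespace Call

/-- **iter0 #j** (lines 2767–2768, `j = 0, 1`): `imdct_step3_iter0_loop(n >> 4, u, n2 - 1 - n4 j, -(n >> 3), A)`. -/
structure Iter0 (n j : Nat) : Prop where
  /-- the iteration count `m = (n >> 4) >> 2` -/
  m_eq : (n >>> 4) >>> 2 = n / 64
  /-- at least one iteration -/
  m_pos : 1 ≤ n / 64
  /-- `i_off = n2 - 1 - n4 j` is not negative -/
  ioff : (n / 4) * j + 1 ≤ n / 2
  /-- `k_off = -(n >> 3)` -/
  koff : n >>> 3 = n / 8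
  /-- both runs of `8 m = n8` floats lie in `u[0 .. n2)`: `j = 0`: ee0 `[n2 - n8, n2 - 1]`, ee2 `[n4, n2 - n8 - 1]`;
  `j = 1`: ee0 `[n8, n4 - 1]`, ee2 `[0, n8 - 1]` -/
  e : PairDown (n / 2) (n / 2 - 1 - (n / 4) * j) (n / 8) (8 * (n / 64))
  /-- the run length in closed form -/
  cnt : 8 * (n / 64) = n / 8
  /-- the highest twiddle index `32 m - 7 = n2 - 7` is inside `A[0 .. n2)` -/
  A : 32 * (n / 64) - 7 < n / 2

/-- The facts of the two iter0 calls. -/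
theorem iter0 {n j : Nat} (hn : IsBlocksize n) (hj : j ≤ 1) : Iter0 n j := by
  have hf := hn.facts
  have hj' : j = 0 ∨ j = 1 := by omega
  rcases hj' with rfl | rfl
  · exact ⟨by omega, by omega, by omega, by omega, ⟨by omega, by omega⟩, by omega, by omega⟩
  · exact ⟨by omega, by omega, by omega, by omega, ⟨by omega, by omega⟩, by omega, by omega⟩

/-- **r_loop, iteration 1 of step 3** (lines 2771–2774, `j = 0 .. 3`):
`imdct_step3_inner_r_loop(n >> 5, u, n2 - 1 - n8 j, -(n >> 4), A, 16)`. -/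
structure R1 (n j : Nat) : Prop where
  /-- the iteration count `m = (n >> 5) >> 2`: **0 for `n = 64`** (then the helper touches nothing), 1 for `n = 128` -/
  m_eq : (n >>> 5) >>> 2 = n / 128
  /-- `d0 = n2 - 1 - n8 j` is not negative -/
  d0 : (n / 8) * j + 1 ≤ n / 2
  /-- `k_off = -(n >> 4)` -/
  koff : n >>> 4 = n / 16
  /-- both runs of `8 m` floats lie in `u[0 .. n2)`: e0 `[d0 - n16 + 1, d0]`, e2 `[d0 - n8 + 1, d0 - n16]` (empty for `n = 64`) -/
  e : PairDown (n / 2) (n / 2 - 1 - (n / 8) * j) (n / 16) (8 * (n / 128))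
  /-- the run length in closed form, when there is an iteration -/
  cnt : 128 ≤ n → 8 * (n / 128) = n / 16
  /-- the highest twiddle index `16 (4 m - 1) + 1 = n2 - 15` is inside `A[0 .. n2)`, when there is an iteration -/
  A : 1 ≤ n / 128 → 16 * (4 * (n / 128) - 1) + 1 < n / 2

/-- The facts of the four r_loop calls of iteration 1. -/
theorem r1 {n j : Nat} (hn : IsBlocksize n) (hj : j ≤ 3) : R1 n j := by
  have hc := hn.cases
  have hj' : j = 0 ∨ j = 1 ∨ j = 2 ∨ j = 3 := by omega
  rcases hj' with rfl | rfl | rfl | rfl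
  · exact ⟨by omega, by omega, by omega, ⟨by omega, by omega⟩, by omega, by omega⟩
  · exact ⟨by omega, by omega, by omega, ⟨by omega, by omega⟩, by omega, by omega⟩
  · exact ⟨by omega, by omega, by omega, ⟨by omega, by omega⟩, by omega, by omega⟩
  · exact ⟨by omega, by omega, by omega, ⟨by omega, by omega⟩, by omega, by omega⟩

/-- The r_loop calls of iteration 1 run zero times exactly for the smallest block size. -/
theorem r1_count {n : Nat} (hn : IsBlocksize n) : (n / 128 = 0 ↔ n = 64) ∧ (n = 128 → n / 128 = 1) := by
  have := hn.cases
  omega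

/-- **The first `l` loop, facts that do not depend on `i`** (lines 2777–2783):
`imdct_step3_inner_r_loop(n >> (l + 4), u, n2 - 1 - k0 i, -k0_2, A, 1 << (l + 3))` for `i < lim`. -/
structure FirstL (n l : Nat) : Prop where
  /-- the iteration count of each call, `m = (n >> (l + 4)) >> 2 = n >> (l + 6)` -/
  m_eq : (n >>> (l + 4)) >>> 2 = rlim n l
  /-- at least two iterations (so `n >> (l + 4)` is a multiple of 4 and the count is exact) -/
  m_ge : 2 ≤ rlim n l
  /-- the run length `8 m` is `k0_2`: e0 `[d0 - k0_2 + 1, d0]`, e2 `[d0 - k0 + 1, d0 - k0_2]` -/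
  cnt : 8 * rlim n l = k02 n l
  /-- `k0_2` is half of `k0` exactly -/
  half : 2 * k02 n l = k0 n l
  /-- the `lim` calls tile `u[0 .. n2)`: `k0 lim = n2` -/
  tile : k0 n l * lim l = n / 2
  /-- the twiddle stride times the quarters of one call is `n2`: `k1 · 4 m = n2` -/
  A_eq : k1 l * (4 * rlim n l) = n / 2
  /-- the highest twiddle index `k1 (4 m - 1) + 1 = n2 - k1 + 1` is inside `A[0 .. n2)` -/
  A : k1 l * (4 * rlim n l - 1) + 1 < n / 2
  /-- `lim ≤ 32` -/
  lim_le : lim l ≤ 32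
  /-- the shift counts `l + 1 .. l + 6` are below 32 (no masking), the shifted values below `2 ^ 14` -/
  counts : l + 6 ≤ 12

/-- The facts of the first `l` loop at `l`. -/
theorem firstL {n k l : Nat} (h : Ld n k) (hl : InFirst k l) : FirstL n l := by
  rcases hl.cases h with ⟨rfl, rfl⟩ | ⟨rfl, rfl⟩ | ⟨rfl, rfl⟩ | ⟨rfl, rfl⟩ | ⟨rfl, rfl⟩ | ⟨rfl, rfl⟩ | ⟨rfl, rfl⟩ | ⟨rfl, rfl⟩ |
      ⟨rfl, rfl⟩ <;>
    exact ⟨by decide, by decide, by decide, by decide, by decide, by decide, by decide, by decide, by decide⟩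

/-- **The first `l` loop, call number `i < lim`**: `d0 = n2 - 1 - k0 i` is not negative (`imul edi, r13d` gives `k0 i < n2`), and
both runs lie in `u[0 .. n2)`. -/
theorem firstL_call {n k l i : Nat} (h : Ld n k) (hl : InFirst k l) (hi : i < lim l) :
    k0 n l * i + k0 n l ≤ n / 2 ∧ PairDown (n / 2) (n / 2 - 1 - k0 n l * i) (k02 n l) (8 * rlim n l) := by
  unfold lim at hi
  unfold k0 k02 k0 rlim
  rcases hl.cases h with ⟨rfl, rfl⟩ | ⟨rfl, rfl⟩ | ⟨rfl, rfl⟩ | ⟨rfl, rfl⟩ | ⟨rfl, rfl⟩ | ⟨rfl, rfl⟩ | ⟨rfl, rfl⟩ | ⟨rfl, rfl⟩ |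
      ⟨rfl, rfl⟩ <;>
    exact ⟨by omega, ⟨by omega, by omega⟩⟩

/-- **The second `l` loop, facts that do not depend on `r`** (lines 2785–2797):
`imdct_step3_inner_s_loop(lim, u, i_off, -k0_2, A0, k1, k0)` for `r = rlim … 1`, then `A0 += 4 k1`, `i_off -= 8`. -/
structure SecondL (n l : Nat) : Prop where
  /-- at least two rounds of the `r` loop (`l < ld - 6`): this is what keeps `A0 + 3 k1 + 1 < n2` and the lowest `ee2` at 0 -/
  rlim_ge : 2 ≤ rlim n l
  /-- the `r` rounds shift `i_off` by `8 rlim = k0_2` in all -/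
  r_span : 8 * rlim n l = k02 n l
  /-- `k0_2` is half of `k0` exactly -/
  half : 2 * k02 n l = k0 n l
  /-- the `lim` iterations of one call tile `u[0 .. n2)` at stride `k0`: `k0 lim = n2` -/
  tile : k0 n l * lim l = n / 2
  /-- the twiddle pointer `A0` walks `4 k1 rlim = n2` floats in all -/
  A_span : 4 * k1 l * rlim n l = n / 2
  /-- `A0 += k1 * 4` is computed as `4 << (l + 3)` -/
  A_step : 4 <<< (l + 3) = 4 * k1 l
  /-- `a_off = k1 ≤ 512`: `2 a_off`, `3 a_off` in 32 bits -/
  k1_le : k1 l ≤ 512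
  /-- `lim ≤ 128` -/
  lim_le : lim l ≤ 128
  /-- the shift counts `l + 1 .. l + 6` are below 32 (no masking); the byte `[rbp - 48H] = l + 3 ≤ 9` -/
  counts : l + 6 ≤ 12

/-- The facts of the second `l` loop at `l`. -/
theorem secondL {n k l : Nat} (h : Ld n k) (hl : InSecond k l) : SecondL n l := by
  rcases hl.cases h with ⟨rfl, rfl⟩ | ⟨rfl, rfl⟩ | ⟨rfl, rfl⟩ | ⟨rfl, rfl⟩ | ⟨rfl, rfl⟩ | ⟨rfl, rfl⟩ <;>
    exact ⟨by decide, by decide, by decide, by decide, by decide, by decide, by decide, by decide, by decide⟩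

/-- **The second `l` loop, round `t = rlim - r` of the `r` loop** (`t < rlim`): `i_off = n2 - 1 - 8 t` is not negative, all
`2 lim` groups of 8 floats lie in `u[0 .. n2)` (the lowest, for `t = rlim - 1`, starts at index 0), and the 8 twiddle factors
`A0[j k1 + d]` with `A0 = A + 4 k1 t` lie in `A[0 .. n2)`. -/
theorem secondL_call {n k l t : Nat} (h : Ld n k) (hl : InSecond k l) (ht : t < rlim n l) :
    8 * t + 8 ≤ n / 2 ∧
    StrideDown (n / 2) (n / 2 - 1 - 8 * t) (k02 n l) (k0 n l) (lim l) ∧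
    4 * k1 l * t + 3 * k1 l + 1 < n / 2 := by
  unfold rlim at ht
  unfold k0 k02 k0 lim k1
  rcases hl.cases h with ⟨rfl, rfl⟩ | ⟨rfl, rfl⟩ | ⟨rfl, rfl⟩ | ⟨rfl, rfl⟩ | ⟨rfl, rfl⟩ | ⟨rfl, rfl⟩ <;>
    exact ⟨by omega, ⟨by omega, by omega⟩, by omega⟩

/-- **ld654** (line 2804): `imdct_step3_inner_s_loop_ld654(n >> 5, u, n2 - 1, A, n)`. -/
structure Ld654 (n : Nat) : Prop where
  /-- the iteration count `n' = n >> 5`, at least 2 -/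
  m_eq : n >>> 5 = n / 32
  /-- at least two iterations -/
  m_ge : 2 ≤ n / 32
  /-- `16 * n'` in 32 bits (`shl ebp, 4`) -/
  shl : 16 * (n / 32) ≤ 4096
  /-- the `16 n'` floats are exactly `u[0 .. n2)`: `z0 = u + n2 - 1`, run `[n2 - 16 n', n2 - 1] = [0, n2 - 1]` -/
  span : 16 * (n / 32) = n / 2
  /-- `base = z0 - 16 n'` floats is `u - 1` float: in bytes, `4 (n2 - 1) + 4 = 64 n'` -/
  base : 4 * (n / 2 - 1) + 4 = 64 * (n / 32)
  /-- `a_off = base_n >> 3 = n8` -/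
  aoff : n >>> 3 = n / 8
  /-- `A[n8]` is inside `A[0 .. n2)` -/
  A : n / 8 < n / 2

/-- The facts of the ld654 call. -/
theorem ld654 {n : Nat} (hn : IsBlocksize n) : Ld654 n := by
  have := hn.facts
  exact ⟨by omega, by omega, by omega, by omega, by omega, by omega, by omega⟩

/-- ld654's `base` as a pointer value: with `u ≥ 4` the subtraction `z0 - 64 n'` does not wrap and gives `u - 4`, in the form
`Ld654.test` wants (`pb + 64 m = z0`). -/
theorem ld654_base {n u : Nat} (hn : IsBlocksize n) (hu : 4 ≤ u) : (u - 4) + 64 * (n / 32) = u + 4 * (n / 2 - 1) := by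
  have := hn.facts
  omega

/-- The measures of the four loops of the nest decrease: outer loops `(ld - 3) / 2 - l` and `ld - 6 - l`, inner loops `lim - i`
and `r`. (Trivial; recorded so that nobody looks for a subtlety.) -/
theorem measures {k l : Nat} : (InFirst k l → (k - 3) / 2 - (l + 1) < (k - 3) / 2 - l) ∧
    (InSecond k l → k - 6 - (l + 1) < k - 6 - l) := by
  unfold InFirst InSecond
  omega

end Call

end Vorbis.Mdct
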